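-- pv_equiv track=rewrite | github.com/jaysonlarose/jlib | jlib/__init__.py | rstripn
-- ===== SOURCE A (Python) =====
-- def rstripn(text, count, chars=None):
-- 	"""
-- 	Strip up to `count` trailing characters of whitespace from a string.
--
-- 	As with the builtin `str.lstrip()` method, if `chars` is specified,
-- 	those characters will be stripped instead.
-- 	"""
-- 	if chars is None:
-- 		import string
-- 		chars = string.whitespace
-- 	for i in range(count):
-- 		if len(text) == 0:
-- 			break
-- 		if text[-1] in chars:
-- 			text = text[:-1]
-- 		else:
-- 			break
-- 	return text
-- ===== SOURCE B (Python) =====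
-- import string
--
-- def rstripn(text, count, chars=None):
--     if chars is None:
--         chars = string.whitespace
--     stripped = text.rstrip(chars)
--     removed = len(text) - len(stripped)
--     n = max(0, min(count, removed))
--     return text[: len(text) - n]
-- ===== Notes on version B (the rewrite author's own statement) =====
-- stated objective: faster
-- what changed: Replaces A's bounded element-by-element loop (pop one trailing char per iteration with text[:-1], up to count times) with a single str.rstrip(chars) call that removes the whole trailing run, then arithmetically caps the number of removed characters at count and slices once.
import Mathlib
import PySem

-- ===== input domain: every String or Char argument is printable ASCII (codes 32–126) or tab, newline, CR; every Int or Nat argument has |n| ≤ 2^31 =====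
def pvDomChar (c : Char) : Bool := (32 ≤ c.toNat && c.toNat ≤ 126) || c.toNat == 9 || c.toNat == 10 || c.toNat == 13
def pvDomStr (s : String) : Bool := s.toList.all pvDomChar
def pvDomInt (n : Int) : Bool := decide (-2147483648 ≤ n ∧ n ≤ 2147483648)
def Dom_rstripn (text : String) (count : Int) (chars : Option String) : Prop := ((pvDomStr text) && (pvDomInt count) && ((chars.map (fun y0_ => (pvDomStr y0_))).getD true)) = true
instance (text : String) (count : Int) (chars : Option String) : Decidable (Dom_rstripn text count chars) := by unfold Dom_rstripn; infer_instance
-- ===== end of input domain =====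

-- B replaces A's one-char-per-iteration trailing strip loop by one rstrip(chars) call
-- capped arithmetically at count (objective: simpler).


-- ===== PORT A =====
-- the loop body: each of the (up to count) iterations checks emptiness, the last char,
-- and pops it with text[:-1] (= dropLast, exact: PySem.List.slice_to_neg_one);
-- text[-1] on a nonempty list is its last element (exact: PySem.List.pyGetD_neg_one).
def rstripnGo (cs : List Char) : Nat → List Char → List Char
  | 0, t => t
  | k + 1, t =>
    if h : t = [] then t
    else if t.getLast h ∈ cs then rstripnGo cs k t.dropLast
    else t

def rstripn (text : String) (count : Int) (chars : Option String) : String :=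
  -- chars is None → string.whitespace = " \t\n\r\x0b\x0c"
  let cs := (chars.getD " \t\n\r\x0B\x0C").toList
  -- range(count) performs max(count, 0) iterations
  String.ofList (rstripnGo cs count.toNat text.toList)

-- ===== PORT B =====
def rstripn_alt (text : String) (count : Int) (chars : Option String) : String :=
  let cs := (chars.getD " \t\n\r\x0B\x0C").toList
  let l := text.toList
  -- text.rstrip(chars): drop the whole trailing run of characters of cs (exact hand port)
  let stripped := (l.reverse.dropWhile (· ∈ cs)).reverse
  let removed : Int := (l.length : Int) - (stripped.length : Int)
  let n := max 0 (min count removed)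
  -- text[: len(text) - n] with 0 ≤ n ≤ len: a plain take
  String.ofList (l.take (l.length - n.toNat))

-- ===== PRECONDITION & SPEC =====
def Spec_rstripn (text : String) (count : Int) (chars : Option String) (out : String) : Prop := out = rstripn_alt text count chars
instance (text : String) (count : Int) (chars : Option String) (out : String) : Decidable (Spec_rstripn text count chars out) := by unfold Spec_rstripn; infer_instance

-- ===== CLAIM (what is proved, stated in full; the proofs are below) =====
def Claim_equal_rstripn : Prop := ∀ (text : String) (count : Int) (chars : Option String), Dom_rstripn text count chars → Spec_rstripn text count chars (rstripn text count chars)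

-- ===== LEMMAS AND PROOFS =====

-- length of the trailing run of cs-characters in l
def runLen (cs : List Char) (l : List Char) : Nat := (l.reverse.takeWhile (· ∈ cs)).length

theorem run_partition (cs l : List Char) :
    runLen cs l + (l.reverse.dropWhile (fun c => decide (c ∈ cs))).length = l.length := by
  unfold runLen
  rw [← List.length_append, List.takeWhile_append_dropWhile, List.length_reverse]

theorem runLen_le (cs l : List Char) : runLen cs l ≤ l.length := by
  have := run_partition cs l
  omega

theorem runLen_dropLast (cs : List Char) (l : List Char) (h : l ≠ [])
    (hc : l.getLast h ∈ cs) : runLen cs l = runLen cs l.dropLast + 1 := by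
  have hrev : l.reverse = l.getLast h :: l.dropLast.reverse := by
    conv_lhs => rw [← List.dropLast_append_getLast h]
    simp
  simp [runLen, hrev, hc]

theorem runLen_zero (cs : List Char) (l : List Char) (h : l ≠ [])
    (hc : l.getLast h ∉ cs) : runLen cs l = 0 := by
  have hrev : l.reverse = l.getLast h :: l.dropLast.reverse := by
    conv_lhs => rw [← List.dropLast_append_getLast h]
    simp
  simp [runLen, hrev, hc]

theorem take_dropLast_eq {α : Type} (l : List α) (m : Nat) (h : m ≤ l.length - 1) :
    l.dropLast.take m = l.take m := by
  rw [List.dropLast_eq_take, List.take_take, Nat.min_eq_left h]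

theorem rstripnGo_eq (cs : List Char) (k : Nat) (l : List Char) :
    rstripnGo cs k l = l.take (l.length - min k (runLen cs l)) := by
  induction k generalizing l with
  | zero => simp [rstripnGo]
  | succ k ih =>
    by_cases h : l = []
    · subst h; simp [rstripnGo]
    · by_cases hc : l.getLast h ∈ cs
      · have hne : 1 ≤ l.length := by
          cases l with
          | nil => exact absurd rfl h
          | cons a t => simp
        have hr := runLen_dropLast cs l h hc
        have hrle := runLen_le cs l.dropLast
        rw [List.length_dropLast] at hrle
        rw [rstripnGo]
        simp only [h, hc, if_pos, reduceDIte]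
        rw [ih, take_dropLast_eq l _ (by simp [List.length_dropLast])]
        congr 1
        rw [hr]
        simp only [List.length_dropLast]
        omega
      · rw [rstripnGo]
        simp only [h, hc, reduceDIte]
        rw [runLen_zero cs l h hc]
        simp

theorem alt_take_eq (cs : List Char) (count : Int) (l : List Char) :
    l.take (l.length -
      (max 0 (min count ((l.length : Int) -
        ((l.reverse.dropWhile (fun c => decide (c ∈ cs))).reverse.length : Int)))).toNat)
    = l.take (l.length - min count.toNat (runLen cs l)) := by
  have hp := run_partition cs l
  congr 1
  simp only [List.length_reverse]
  omega

theorem rstripn_spec : Claim_equal_rstripn := by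
  intro text count chars _
  unfold Spec_rstripn rstripn rstripn_alt
  simp only
  rw [rstripnGo_eq]
  rw [← alt_take_eq ((chars.getD " \t\n\r\x0B\x0C").toList) count text.toList]
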